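-- pv_equiv track=rewrite | github.com/ItsWatchMakerr/wayland-clip-sync | wayland-clip-sync.py | choose_mime
-- ===== SOURCE A (Python) =====
-- from typing import List, Tuple, Optional
--
-- def choose_mime(mimes: List[str]) -> Optional[str]:
--     prefs = [
--         "image/png", "image/jpeg", "image/webp",
--         "text/plain;charset=utf-8", "text/plain",
--     ]
--     for pref in prefs:
--         for m in mimes:
--             if m == pref or (pref.startswith("text/plain") and m.startswith("text/plain")):
--                 return m
--     return mimes[0] if mimes else None
-- ===== SOURCE B (Python) =====
-- def choose_mime(mimes):
--     def rank(m):
--         if m == "image/png":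
--             return 0
--         if m == "image/jpeg":
--             return 1
--         if m == "image/webp":
--             return 2
--         if m.startswith("text/plain"):
--             return 3
--         return 5  # sentinel: no preference matches
--     best, best_r = None, 6
--     for m in mimes:
--         r = rank(m)
--         if r < best_r:
--             best, best_r = m, r
--     return best
-- ===== Notes on version B (the rewrite author's own statement) =====
-- stated objective: faster
-- what changed: Replaces the nested preference-by-preference scan (up to 5 passes over mimes) with a single pass that ranks each mime once and keeps the first mime of minimal rank; the all-unmatched sentinel rank makes the fallback mimes[0] fall out for free.
import Mathlib
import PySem

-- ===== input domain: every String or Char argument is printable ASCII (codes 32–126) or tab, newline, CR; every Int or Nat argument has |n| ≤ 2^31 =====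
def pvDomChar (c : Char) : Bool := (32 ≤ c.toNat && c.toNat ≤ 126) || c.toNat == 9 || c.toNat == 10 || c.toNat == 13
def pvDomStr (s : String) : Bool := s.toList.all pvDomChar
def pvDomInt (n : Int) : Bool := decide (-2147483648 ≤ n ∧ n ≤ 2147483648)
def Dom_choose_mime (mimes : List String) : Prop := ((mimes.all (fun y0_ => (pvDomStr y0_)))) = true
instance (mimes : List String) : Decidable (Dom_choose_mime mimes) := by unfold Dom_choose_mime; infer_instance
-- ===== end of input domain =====

-- B replaces A's nested preference-by-preference scan (up to 5 passes over mimes) with a single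
-- ranking pass keeping the first mime of minimal rank (objective: faster by a constant factor).

-- ===== PORT A =====
-- the loop body's condition, verbatim
def condA (pref m : String) : Bool :=
  m == pref || (PySem.Str.startswith pref "text/plain" && PySem.Str.startswith m "text/plain")

-- outer 'for pref in prefs' loop; the inner 'for m in mimes: if …: return m' is List.find?
def loopA : List String → List String → Option String
  | [], _ => none
  | p :: ps, mimes =>
    match mimes.find? (condA p) with
    | some m => some m
    | none => loopA ps mimes

def choose_mime (mimes : List String) : Option String :=
  match loopA ["image/png", "image/jpeg", "image/webp",
               "text/plain;charset=utf-8", "text/plain"] mimes with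
  | some m => some m
  | none => mimes.head?   -- 'mimes[0] if mimes else None'

-- ===== PORT B =====
def rankB (m : String) : Nat :=
  if m == "image/png" then 0
  else if m == "image/jpeg" then 1
  else if m == "image/webp" then 2
  else if PySem.Str.startswith m "text/plain" then 3
  else 5

def stepB (st : Option String × Nat) (m : String) : Option String × Nat :=
  if rankB m < st.2 then (some m, rankB m) else st

def choose_mime_alt (mimes : List String) : Option String :=
  (mimes.foldl stepB ((none : Option String), 6)).1

-- ===== PRECONDITION & SPEC =====
def Spec_choose_mime (mimes : List String) (out : Option String) : Prop := out = choose_mime_alt mimes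
instance (mimes : List String) (out : Option String) : Decidable (Spec_choose_mime mimes out) := by unfold Spec_choose_mime; infer_instance

-- ===== CLAIM (what is proved, stated in full; the proofs are below) =====
def Claim_equal_choose_mime : Prop := ∀ (mimes : List String), Dom_choose_mime mimes → Spec_choose_mime mimes (choose_mime mimes)

-- ===== LEMMAS AND PROOFS =====

-- reference function: the first element attaining the minimal rank (ties to the earlier one)
def firstMin : List String → Option (String × Nat)
  | [] => none
  | x :: xs =>
    match firstMin xs with
    | none => some (x, rankB x)
    | some (y, ry) => if rankB x ≤ ry then some (x, rankB x) else some (y, ry)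

theorem rankB_lt_6 (m : String) : rankB m < 6 := by
  unfold rankB; split_ifs <;> omega

theorem rankB_values (m : String) :
    rankB m = 0 ∨ rankB m = 1 ∨ rankB m = 2 ∨ rankB m = 3 ∨ rankB m = 5 := by
  unfold rankB; split_ifs <;> simp

theorem foldl_stepB (xs : List String) : ∀ (b : String) (r : Nat),
    (xs.foldl stepB (some b, r)).1 =
      some ((firstMin xs).elim b (fun p => if p.2 < r then p.1 else b)) := by
  induction xs with
  | nil => intro b r; simp [firstMin]
  | cons x xs ih =>
    intro b r
    simp only [List.foldl_cons, stepB, firstMin]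
    cases hfm : firstMin xs with
    | none =>
      by_cases h : rankB x < r
      · rw [if_pos h, ih, hfm]; simp [h]
      · rw [if_neg h, ih, hfm]; simp [h]
    | some p =>
      obtain ⟨y, ry⟩ := p
      by_cases h : rankB x < r
      · rw [if_pos h, ih, hfm]
        simp only [Option.elim_some]
        by_cases hxy : rankB x ≤ ry
        · rw [if_pos hxy]; simp only [Option.elim_some]; split_ifs <;> first | rfl | omega
        · rw [if_neg hxy]; simp only [Option.elim_some]; split_ifs <;> first | rfl | omega
      · rw [if_neg h, ih, hfm]
        simp only [Option.elim_some]
        by_cases hxy : rankB x ≤ ry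
        · rw [if_pos hxy]; simp only [Option.elim_some]; split_ifs <;> first | rfl | omega
        · rw [if_neg hxy]; simp only [Option.elim_some]

theorem alt_eq_firstMin (xs : List String) :
    choose_mime_alt xs = (firstMin xs).map Prod.fst := by
  cases xs with
  | nil => rfl
  | cons x xs =>
    simp only [choose_mime_alt, List.foldl_cons, stepB]
    rw [if_pos (by simpa using rankB_lt_6 x), foldl_stepB]
    simp only [firstMin]
    cases hfm : firstMin xs with
    | none => simp
    | some p =>
      obtain ⟨y, ry⟩ := p
      simp only [Option.elim_some]
      by_cases hxy : rankB x ≤ ry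
      · rw [if_pos hxy]
        simp only [Option.map_some]
        split_ifs <;> first | rfl | omega
      · rw [if_neg hxy]
        simp only [Option.map_some]
        split_ifs <;> first | rfl | omega

theorem firstMin_eq_none {xs : List String} (h : firstMin xs = none) : xs = [] := by
  cases xs with
  | nil => rfl
  | cons x xs =>
    exfalso
    simp only [firstMin] at h
    cases hfm : firstMin xs with
    | none => rw [hfm] at h; simp at h
    | some p => obtain ⟨y, ry⟩ := p; rw [hfm] at h; dsimp only at h; split_ifs at h <;> simp at h

theorem firstMin_spec (xs : List String) : ∀ (y : String) (ry : Nat), firstMin xs = some (y, ry) →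
    (∀ i, i < ry → xs.find? (fun m => rankB m == i) = none) ∧
      xs.find? (fun m => rankB m == ry) = some y := by
  induction xs with
  | nil => intro y ry h; simp [firstMin] at h
  | cons x xs ih =>
    intro y ry h
    simp only [firstMin] at h
    cases hfm : firstMin xs with
    | none =>
      rw [hfm] at h; dsimp only at h
      obtain ⟨rfl, rfl⟩ : x = y ∧ rankB x = ry := by simpa [Prod.ext_iff] using h
      have hnil : xs = [] := firstMin_eq_none hfm
      subst hnil
      constructor
      · intro i hi
        rw [List.find?_cons_of_neg (by simp; omega), List.find?_nil]
      · rw [List.find?_cons_of_pos (by simp)]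
    | some p =>
      obtain ⟨z, rz⟩ := p
      rw [hfm] at h; dsimp only at h
      obtain ⟨hz1, hz2⟩ := ih z rz hfm
      by_cases hle : rankB x ≤ rz
      · rw [if_pos hle] at h
        obtain ⟨rfl, rfl⟩ : x = y ∧ rankB x = ry := by simpa [Prod.ext_iff] using h
        constructor
        · intro i hi
          rw [List.find?_cons_of_neg (by simp; omega)]
          exact hz1 i (by omega)
        · rw [List.find?_cons_of_pos (by simp)]
      · rw [if_neg hle] at h
        obtain ⟨rfl, rfl⟩ : z = y ∧ rz = ry := by simpa [Prod.ext_iff] using h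
        constructor
        · intro i hi
          rw [List.find?_cons_of_neg (by simp; omega)]
          exact hz1 i hi
        · rw [List.find?_cons_of_neg (by simp; omega)]
          exact hz2

theorem condA_png : condA "image/png" = (fun m => rankB m == 0) := by
  funext m
  have hs : PySem.Str.startswith "image/png" "text/plain" = false := by decide
  simp only [condA, hs, Bool.false_and, Bool.or_false]
  by_cases h : m = "image/png"
  · subst h; decide
  · have h' : (m == "image/png") = false := by simp [h]
    simp only [rankB, h']
    split_ifs <;> simp_all

theorem condA_jpeg : condA "image/jpeg" = (fun m => rankB m == 1) := by
  funext m
  have hs : PySem.Str.startswith "image/jpeg" "text/plain" = false := by decide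
  simp only [condA, hs, Bool.false_and, Bool.or_false]
  by_cases h : m = "image/jpeg"
  · subst h; decide
  · have h' : (m == "image/jpeg") = false := by simp [h]
    simp only [rankB]
    split_ifs <;> simp_all

theorem condA_webp : condA "image/webp" = (fun m => rankB m == 2) := by
  funext m
  have hs : PySem.Str.startswith "image/webp" "text/plain" = false := by decide
  simp only [condA, hs, Bool.false_and, Bool.or_false]
  by_cases h : m = "image/webp"
  · subst h; decide
  · have h' : (m == "image/webp") = false := by simp [h]
    simp only [rankB]
    split_ifs <;> simp_all

theorem condA_utf8 : condA "text/plain;charset=utf-8" = (fun m => rankB m == 3) := by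
  funext m
  by_cases h0 : m = "image/png"
  · subst h0; decide
  by_cases h1 : m = "image/jpeg"
  · subst h1; decide
  by_cases h2 : m = "image/webp"
  · subst h2; decide
  by_cases h3 : m = "text/plain;charset=utf-8"
  · subst h3; decide
  · have hs : PySem.Str.startswith "text/plain;charset=utf-8" "text/plain" = true := by decide
    have e0 : (m == "image/png") = false := by simp [h0]
    have e1 : (m == "image/jpeg") = false := by simp [h1]
    have e2 : (m == "image/webp") = false := by simp [h2]
    have e3 : (m == "text/plain;charset=utf-8") = false := by simp [h3]
    simp only [condA, rankB, hs, e0, e1, e2, e3, Bool.true_and, Bool.false_or]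
    cases hsw : PySem.Str.startswith m "text/plain" <;> simp

theorem condA_plain : condA "text/plain" = (fun m => rankB m == 3) := by
  funext m
  by_cases h0 : m = "image/png"
  · subst h0; decide
  by_cases h1 : m = "image/jpeg"
  · subst h1; decide
  by_cases h2 : m = "image/webp"
  · subst h2; decide
  by_cases h3 : m = "text/plain"
  · subst h3; decide
  · have hs : PySem.Str.startswith "text/plain" "text/plain" = true := by decide
    have e0 : (m == "image/png") = false := by simp [h0]
    have e1 : (m == "image/jpeg") = false := by simp [h1]
    have e2 : (m == "image/webp") = false := by simp [h2]
    have e3 : (m == "text/plain") = false := by simp [h3]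
    simp only [condA, rankB, hs, e0, e1, e2, e3, Bool.true_and, Bool.false_or]
    cases hsw : PySem.Str.startswith m "text/plain" <;> simp

theorem A_eq_firstMin (xs : List String) :
    choose_mime xs = (firstMin xs).map Prod.fst := by
  unfold choose_mime
  simp only [loopA, condA_png, condA_jpeg, condA_webp, condA_utf8, condA_plain]
  cases hfm : firstMin xs with
  | none =>
    have hnil : xs = [] := firstMin_eq_none hfm
    subst hnil; rfl
  | some p =>
    obtain ⟨y, ry⟩ := p
    obtain ⟨hnone, hsome⟩ := firstMin_spec xs y ry hfm
    have hry : rankB y = ry := by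
      have := List.find?_some hsome
      simpa using this
    rcases rankB_values y with h | h | h | h | h <;> rw [hry] at h <;> subst h
    · rw [hsome]; rfl
    · rw [hnone 0 (by omega), hsome]; rfl
    · rw [hnone 0 (by omega), hnone 1 (by omega), hsome]; rfl
    · rw [hnone 0 (by omega), hnone 1 (by omega), hnone 2 (by omega), hsome]; rfl
    · rw [hnone 0 (by omega), hnone 1 (by omega), hnone 2 (by omega), hnone 3 (by omega)]
      -- all four preference scans fail: every mime has rank 5, so the fallback is the head = y
      cases xs with
      | nil => simp at hsome
      | cons h t =>
        rcases rankB_values h with hh | hh | hh | hh | hh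
        · have hc := hnone 0 (by omega); rw [List.find?_cons_of_pos (by simp [hh])] at hc; simp at hc
        · have hc := hnone 1 (by omega); rw [List.find?_cons_of_pos (by simp [hh])] at hc; simp at hc
        · have hc := hnone 2 (by omega); rw [List.find?_cons_of_pos (by simp [hh])] at hc; simp at hc
        · have hc := hnone 3 (by omega); rw [List.find?_cons_of_pos (by simp [hh])] at hc; simp at hc
        · rw [List.find?_cons_of_pos (by simp [hh])] at hsome
          simp only [Option.some.injEq] at hsome
          subst hsome
          rfl

-- ===== VERDICT (by name: the statement is the Claim_ definition above) =====
theorem choose_mime_spec : Claim_equal_choose_mime := by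
  intro xs _
  unfold Spec_choose_mime
  rw [A_eq_firstMin, alt_eq_firstMin]
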